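-- pv_equiv track=rewrite | github.com/isaiahjon3s/up-all-night | improv.py | improv
-- ===== SOURCE A (Python) =====
-- alphabet = list("abcdefghijklmnopqrstuvwxyza")
--
-- def improv(word):
--     if not word[0].isalpha():
--         return "Invalid word"
--     last_letter = word[-1]
--     next_letter = ""
--     i = 0
--     while i < 28:
--         if alphabet[i] == last_letter:
--             next_letter += alphabet[i+1]
--             break
--         i += 1
--     improvd = f"{word}{next_letter}"
--     return improvd
-- ===== SOURCE B (Python) =====
-- def improv(word):
--     if not word[0].isalpha():
--         return "Invalid word"
--     last = word[-1]
--     if 'a' <= last <= 'z':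
--         nxt = 'a' if last == 'z' else chr(ord(last) + 1)
--         return f"{word}{nxt}"
--     return word
-- ===== Notes on version B (the rewrite author's own statement) =====
-- stated objective: simpler
-- what changed: Replaces the 28-step linear scan over the duplicated alphabet table with a closed-form successor: chr(ord(last)+1) for 'a'..'y' and 'a' for 'z'.
-- crash fix: When the first character is alphabetic but the last character is not a lowercase ASCII letter, A's scan runs off the 27-element table and raises IndexError; B returns the word unchanged. — e.g. on improv("A!"): A raises IndexError, B returns "A!"
import Mathlib
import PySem

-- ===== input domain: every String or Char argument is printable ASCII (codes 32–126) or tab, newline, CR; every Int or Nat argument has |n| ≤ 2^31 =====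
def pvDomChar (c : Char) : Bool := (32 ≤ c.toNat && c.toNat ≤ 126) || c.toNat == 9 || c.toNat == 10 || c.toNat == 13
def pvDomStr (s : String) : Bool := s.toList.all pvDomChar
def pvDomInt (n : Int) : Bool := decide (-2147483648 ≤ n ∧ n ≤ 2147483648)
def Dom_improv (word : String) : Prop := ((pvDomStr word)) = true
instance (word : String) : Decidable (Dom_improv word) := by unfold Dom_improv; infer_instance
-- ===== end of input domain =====

-- B replaces A's 28-step linear scan over a duplicated alphabet table with a
-- closed-form successor computation (simpler); where A raises IndexError
-- (alphabetic first char, non-lowercase last char) B returns the word unchanged.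


-- ===== PORT A =====
-- alphabet = list("abcdefghijklmnopqrstuvwxyza")
def pvAlphabet : List Char :=
  ['a','b','c','d','e','f','g','h','i','j','k','l','m','n','o','p','q','r','s','t','u','v','w','x','y','z','a']

-- A's `while i < 28` scan; fuel = remaining iterations (28 at entry, enough for the whole loop);
-- [] stands in for next_letter = "" and for the IndexError cases excluded by Pre_
def pvLoopA (last : Char) (i : Nat) : Nat → List Char
  | 0 => []
  | fuel + 1 =>
    if i < 28 then
      match PySem.List.pyGet? pvAlphabet (i : Int) with
      | none => []  -- IndexError alphabet[i] (outside Pre_)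
      | some c =>
        if c = last then
          match PySem.List.pyGet? pvAlphabet ((i : Int) + 1) with
          | none => []  -- IndexError alphabet[i+1] (unreachable: i+1 ≤ 26 when matched)
          | some d => [d]
        else pvLoopA last (i + 1) fuel
    else []

def improv (word : String) : String :=
  match PySem.List.pyGet? word.toList 0 with
  | none => ""  -- IndexError on word[0] (outside Pre_)
  | some first =>
    if ¬ (PySem.Chars.isalpha first = true) then "Invalid word"
    else
      match PySem.List.pyGet? word.toList (-1) with
      | none => ""  -- unreachable: word nonempty here
      | some last => String.ofList (word.toList ++ pvLoopA last 0 28)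

-- ===== PORT B =====
def improv_alt (word : String) : String :=
  match word.toList with
  | [] => ""  -- IndexError on word[0] (outside Pre_)
  | first :: rest =>
    if PySem.Chars.isalpha first = false then "Invalid word"
    else
      let last := (first :: rest).getLast (by simp)
      if 'a' ≤ last ∧ last ≤ 'z' then
        String.ofList ((first :: rest) ++ [if last = 'z' then 'a' else Char.ofNat (last.toNat + 1)])
      else word

-- ===== PRECONDITION & SPEC =====
-- Pre_ excludes the empty string (A raises IndexError on word[0]) and words whose first
-- character is alphabetic but whose last character is not a lowercase letter (A's scan
-- runs past the 27-element table and raises IndexError).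
def Pre_improv (word : String) : Prop :=
  word.toList ≠ [] ∧
  (PySem.Chars.isalpha (word.toList.headD 'a') = false ∨
   ('a' ≤ word.toList.getLastD 'a' ∧ word.toList.getLastD 'a' ≤ 'z'))
instance (word : String) : Decidable (Pre_improv word) := by unfold Pre_improv; infer_instance
def pvWitness_improv : String := "az"

-- When the first character is alphabetic but the last is not a lowercase ASCII letter,
-- A raises IndexError (the scan runs off the table); B returns the word unchanged.
def Raises_improv (word : String) : Prop :=
  word.toList ≠ [] ∧
  PySem.Chars.isalpha (word.toList.headD 'a') = true ∧
  ¬ ('a' ≤ word.toList.getLastD 'a' ∧ word.toList.getLastD 'a' ≤ 'z')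
instance (word : String) : Decidable (Raises_improv word) := by unfold Raises_improv; infer_instance
def pvRaiseWitness_improv : String := "A!"
def pvRaiseWitnessOut_improv : String := "A!"

def Spec_improv (word : String) (out : String) : Prop := out = improv_alt word
instance (word : String) (out : String) : Decidable (Spec_improv word out) := by unfold Spec_improv; infer_instance

-- ===== CLAIM (what is proved, stated in full; the proofs are below) =====
def Claim_equal_improv : Prop := ∀ (word : String), Dom_improv word → Pre_improv word → Spec_improv word (improv word)
def Claim_raises_improv : Prop := (∀ (word : String), Dom_improv word → Raises_improv word → ¬ Pre_improv word) ∧ (Dom_improv (pvRaiseWitness_improv) ∧ Raises_improv (pvRaiseWitness_improv) ∧ improv_alt (pvRaiseWitness_improv) = pvRaiseWitnessOut_improv)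

-- ===== LEMMAS AND PROOFS =====

def pvLower : List Char :=
  ['a','b','c','d','e','f','g','h','i','j','k','l','m','n','o','p','q','r','s','t','u','v','w','x','y','z']

-- any char with 'a' ≤ c ≤ 'z' is one of the 26 lowercase letters
lemma pv_mem_lower (c : Char) (h1 : 'a' ≤ c) (h2 : c ≤ 'z') : c ∈ pvLower := by
  have hl : 97 ≤ c.toNat := h1
  have hr : c.toNat ≤ 122 := h2
  interval_cases h : c.toNat <;>
    · have hc : c = Char.ofNat c.toNat := (Char.ofNat_toNat c).symm
      rw [h] at hc; subst hc; decide

-- A's scan computes the closed-form successor for every lowercase letter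
lemma pv_loop_eq (c : Char) (hm : c ∈ pvLower) :
    pvLoopA c 0 28 = [if c = 'z' then 'a' else Char.ofNat (c.toNat + 1)] := by
  fin_cases hm <;> decide

-- ===== VERDICT (by name: the statement is the Claim_ definition above) =====
theorem improv_spec : Claim_equal_improv := by
  intro word _ hpre
  obtain ⟨hne, hdisj⟩ := hpre
  unfold Spec_improv improv improv_alt
  cases hlist : word.toList with
  | nil => exact absurd hlist hne
  | cons first rest =>
    rw [hlist] at hdisj
    simp only [List.headD_cons] at hdisj
    rw [PySem.List.pyGet?_zero_cons]
    by_cases halpha : PySem.Chars.isalpha first = true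
    · have hlow : 'a' ≤ (first :: rest).getLast (by simp) ∧
          (first :: rest).getLast (by simp) ≤ 'z' := by
        rcases hdisj with h | h
        · rw [halpha] at h; exact absurd h (by decide)
        · rwa [List.getLastD_eq_getLast?, List.getLast?_eq_some_getLast (l := first :: rest)
            (h := by simp), Option.getD_some] at h
      have hget : PySem.List.pyGet? (first :: rest) (-1) =
          some ((first :: rest).getLast (by simp)) := by
        rw [PySem.List.pyGet?_neg_one, List.getLast?_eq_some_getLast]
      simp only [halpha, not_true, if_false, Bool.true_eq_false, hget, if_pos hlow,
        pv_loop_eq _ (pv_mem_lower _ hlow.1 hlow.2)]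
    · simp only [Bool.not_eq_true] at halpha
      simp [halpha]

-- improv_raises is the verdict for the crash-fix claim Claim_raises_improv above
theorem improv_raises : Claim_raises_improv := by
  unfold Claim_raises_improv
  refine ⟨?_, by decide⟩
  rintro word _ ⟨hne, halpha, hnl⟩ ⟨_, hdisj⟩
  rcases hdisj with h | h
  · rw [halpha] at h; exact absurd h (by decide)
  · exact hnl h

-- self-check: the stated raise witness really lies in the raising region
theorem pvRaiseWitness_improv_ok : Raises_improv pvRaiseWitness_improv := improv_raises.2.2.1
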